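-- pv_equiv track=rewrite | github.com/IsaacG/Advent-of-Code | everybody_codes/event2025/quest_05.py | fishbone
-- ===== SOURCE A (Python) =====
-- def fishbone(numbers):
--     segments = []
--     for number in numbers:
--         for segment in segments:
--             if number < segment[1] and segment[0] is None:
--                 segment[0] = number
--             elif number > segment[1] and segment[2] is None:
--                 segment[2] = number
--             else:
--                 continue
--             break
--         else:
--             segments.append([None, number, None])
--
--     return segments
-- ===== SOURCE B (Python) =====
-- import bisect
--
-- def fishbone(numbers):
--     # Invariant of the greedy process: among segments whose left slot is free,
--     # centers are non-decreasing in creation order; among segments whose right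
--     # slot is free, centers are non-increasing.  Hence the first segment that
--     # can take `x` on the left is found by binary search in the left-free list,
--     # and likewise on the right; the earlier of the two wins.
--     segments = []
--     lc, li = [], []  # centers (ascending) / segment indices of left-free segments
--     rc, ri = [], []  # negated centers (ascending) / indices of right-free segments
--     for x in numbers:
--         j = bisect.bisect_right(lc, x)
--         k = bisect.bisect_right(rc, -x)
--         cl = li[j] if j < len(li) else None
--         cr = ri[k] if k < len(ri) else None
--         if cl is None and cr is None:
--             lc.append(x); li.append(len(segments))
--             rc.append(-x); ri.append(len(segments))
--             segments.append([None, x, None])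
--         elif cr is None or (cl is not None and cl < cr):
--             segments[cl][0] = x
--             del lc[j]; del li[j]
--         else:
--             segments[cr][2] = x
--             del rc[k]; del ri[k]
--     return segments
-- ===== Notes on version B (the rewrite author's own statement) =====
-- stated objective: faster
-- what changed: A's per-number linear scan of all segments is replaced by two sorted free-slot lists (left-free centers ascending, right-free centers descending, both in creation order) queried with bisect; a proved monotonicity invariant of the greedy process makes the leftmost eligible slot the first element of a binary-searchable suffix.
import Mathlib
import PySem

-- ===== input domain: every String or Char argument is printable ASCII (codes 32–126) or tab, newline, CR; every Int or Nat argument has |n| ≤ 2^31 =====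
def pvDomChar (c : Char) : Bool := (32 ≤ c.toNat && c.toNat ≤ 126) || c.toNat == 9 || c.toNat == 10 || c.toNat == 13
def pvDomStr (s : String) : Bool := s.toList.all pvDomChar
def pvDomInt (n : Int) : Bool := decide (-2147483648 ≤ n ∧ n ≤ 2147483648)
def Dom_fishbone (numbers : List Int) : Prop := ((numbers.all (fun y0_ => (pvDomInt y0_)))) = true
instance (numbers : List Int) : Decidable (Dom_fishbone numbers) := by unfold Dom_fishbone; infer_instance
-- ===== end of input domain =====

-- B replaces A's linear scan over all segments by two sorted free-slot lists
-- (left-free / right-free) queried with bisect; same results on every input.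

-- A segment [left, center, right]; the center is always an Int.
abbrev PvSeg : Type := Option Int × Int × Option Int

def pvSegOut (s : PvSeg) : List (Option Int) := [s.1, some s.2.1, s.2.2]

-- ===== PORT A =====
-- inner `for segment in segments: … break / else` loop of A: the updated
-- segment list if some segment took the number, none otherwise.
def pvPlaceA (x : Int) : List PvSeg → Option (List PvSeg)
  | [] => none
  | (l, c, r) :: rest =>
    if x < c ∧ l = none then some ((some x, c, r) :: rest)
    else if x > c ∧ r = none then some ((l, c, some x) :: rest)
    else (pvPlaceA x rest).map (fun s => (l, c, r) :: s)

def pvStepA (segs : List PvSeg) (x : Int) : List PvSeg :=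
  match pvPlaceA x segs with
  | some s => s
  | none => segs ++ [(none, x, none)]

def fishbone (numbers : List Int) : List (List (Option Int)) :=
  (numbers.foldl pvStepA []).map pvSegOut

-- ===== PORT B =====
-- state of Source B's loop: (segments, lc, li, rc, ri)
abbrev PvStateB : Type := List PvSeg × List Int × List Nat × List Int × List Nat

def pvSetLeft (segs : List PvSeg) (i : Nat) (x : Int) : List PvSeg :=
  segs.modify i (fun s => (some x, s.2.1, s.2.2))

def pvSetRight (segs : List PvSeg) (i : Nat) (x : Int) : List PvSeg :=
  segs.modify i (fun s => (s.1, s.2.1, some x))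

def pvStepB (st : PvStateB) (x : Int) : PvStateB :=
  let (segs, lc, li, rc, ri) := st
  let j := PySem.List.bisectRight lc x
  let k := PySem.List.bisectRight rc (-x)
  match li[j]?, ri[k]? with
  | none, none =>
      (segs ++ [(none, x, none)], lc ++ [x], li ++ [segs.length], rc ++ [-x], ri ++ [segs.length])
  | some cl, none => (pvSetLeft segs cl x, lc.eraseIdx j, li.eraseIdx j, rc, ri)
  | none, some cr => (pvSetRight segs cr x, lc, li, rc.eraseIdx k, ri.eraseIdx k)
  | some cl, some cr =>
      if cl < cr then (pvSetLeft segs cl x, lc.eraseIdx j, li.eraseIdx j, rc, ri)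
      else (pvSetRight segs cr x, lc, li, rc.eraseIdx k, ri.eraseIdx k)

def fishbone_alt (numbers : List Int) : List (List (Option Int)) :=
  (numbers.foldl pvStepB ([], [], [], [], [])).1.map pvSegOut

-- ===== PRECONDITION & SPEC =====
def Spec_fishbone (numbers : List Int) (out : List (List (Option Int))) : Prop := out = fishbone_alt numbers
instance (numbers : List Int) (out : List (List (Option Int))) : Decidable (Spec_fishbone numbers out) := by unfold Spec_fishbone; infer_instance

-- ===== CLAIM (what is proved, stated in full; the proofs are below) =====
def Claim_equal_fishbone : Prop := ∀ (numbers : List Int), Dom_fishbone numbers → Spec_fishbone numbers (fishbone numbers)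

-- ===== LEMMAS AND PROOFS =====

-- qualifying predicates of A's inner scan
def pvQL (x : Int) (s : PvSeg) : Bool := decide (x < s.2.1) && decide (s.1 = none)
def pvQR (x : Int) (s : PvSeg) : Bool := decide (s.2.1 < x) && decide (s.2.2 = none)
def pvQ (x : Int) (s : PvSeg) : Bool := pvQL x s || pvQR x s

-- derived free-slot lists: (center, absolute index) of segments with a free left/right slot
def pvLf : List PvSeg → Nat → List (Int × Nat)
  | [], _ => []
  | s :: rest, i => if s.1 = none then (s.2.1, i) :: pvLf rest (i + 1) else pvLf rest (i + 1)

def pvRf : List PvSeg → Nat → List (Int × Nat)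
  | [], _ => []
  | s :: rest, i => if s.2.2 = none then (s.2.1, i) :: pvRf rest (i + 1) else pvRf rest (i + 1)

def pvLc (segs : List PvSeg) : List Int := (pvLf segs 0).map Prod.fst
def pvLi (segs : List PvSeg) : List Nat := (pvLf segs 0).map Prod.snd
def pvRc (segs : List PvSeg) : List Int := (pvRf segs 0).map (fun p => -p.1)
def pvRi (segs : List PvSeg) : List Nat := (pvRf segs 0).map Prod.snd

-- the sortedness invariant of the greedy process
def pvInv (segs : List PvSeg) : Prop :=
  List.Pairwise (· ≤ ·) (pvLc segs) ∧ List.Pairwise (· ≤ ·) (pvRc segs)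

def pvMinOpt : Option Nat → Option Nat → Option Nat
  | none, b => b
  | a, none => a
  | some a, some b => some (min a b)

theorem pvLf_mem (segs : List PvSeg) (i0 : Nat) :
    ∀ p ∈ pvLf segs i0, (∃ s ∈ segs, s.1 = none ∧ s.2.1 = p.1) ∧ i0 ≤ p.2 := by
  induction segs generalizing i0 with
  | nil => simp [pvLf]
  | cons s rest ih =>
    intro p hp
    rw [pvLf] at hp
    by_cases h : s.1 = none
    · rw [if_pos h, List.mem_cons] at hp
      rcases hp with hp | hp
      · subst hp; exact ⟨⟨s, by simp, h, rfl⟩, le_refl _⟩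
      · obtain ⟨⟨t, ht, h1, h2⟩, h3⟩ := ih (i0+1) p hp
        exact ⟨⟨t, by simp [ht], h1, h2⟩, by omega⟩
    · rw [if_neg h] at hp
      obtain ⟨⟨t, ht, h1, h2⟩, h3⟩ := ih (i0+1) p hp
      exact ⟨⟨t, by simp [ht], h1, h2⟩, by omega⟩

theorem pvLf_append (x : Int) (segs : List PvSeg) (i0 : Nat) :
    pvLf (segs ++ [(none, x, none)]) i0 = pvLf segs i0 ++ [(x, i0 + segs.length)] := by
  induction segs generalizing i0 with
  | nil => simp [pvLf]
  | cons s rest ih =>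
    by_cases h : s.1 = none <;>
      simp [pvLf, h, ih (i0+1)] <;> omega

theorem pvLf_modifyRight (x : Int) (segs : List PvSeg) (i0 n : Nat) :
    pvLf (segs.modify n (fun s => (s.1, s.2.1, some x))) i0 = pvLf segs i0 := by
  induction segs generalizing i0 n with
  | nil => simp
  | cons s rest ih =>
    cases n with
    | zero => simp only [List.modify_cons, if_pos rfl]; simp [pvLf]
    | succ n =>
      simp only [List.modify_cons, Nat.succ_ne_zero, Nat.add_sub_cancel, if_false,
        if_neg (Nat.succ_ne_zero n)]
      simp [pvLf, ih]

theorem pvLf_setLeft (x : Int) (segs : List PvSeg) (i0 j : Nat) (c : Int) (m : Nat)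
    (h : (pvLf segs i0)[j]? = some (c, m)) :
    pvLf (segs.modify (m - i0) (fun s => (some x, s.2.1, s.2.2))) i0 = (pvLf segs i0).eraseIdx j := by
  induction segs generalizing i0 j with
  | nil => simp [pvLf] at h
  | cons s rest ih =>
    by_cases hs : s.1 = none
    · rw [pvLf, if_pos hs] at h ⊢
      cases j with
      | zero =>
        simp only [List.getElem?_cons_zero, Option.some.injEq, Prod.mk.injEq] at h
        have hm : m - i0 = 0 := by omega
        rw [hm, List.modify_cons, if_pos rfl]
        rw [pvLf]
        simp [List.eraseIdx_cons_zero]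
      | succ j =>
        simp only [List.getElem?_cons_succ] at h
        have hge : i0 + 1 ≤ m := by
          have := pvLf_mem rest (i0+1) (c, m) (List.mem_of_getElem? h)
          exact this.2
        have hm : m - i0 = (m - (i0+1)) + 1 := by omega
        rw [hm, List.modify_cons, if_neg (by omega), Nat.add_sub_cancel]
        rw [pvLf, if_pos hs, ih (i0+1) j h, List.eraseIdx_cons_succ]
    · rw [pvLf, if_neg hs] at h ⊢
      have hge : i0 + 1 ≤ m := (pvLf_mem rest (i0+1) (c, m) (List.mem_of_getElem? h)).2
      have hm : m - i0 = (m - (i0+1)) + 1 := by omega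
      rw [hm, List.modify_cons, if_neg (by omega), Nat.add_sub_cancel]
      rw [pvLf, if_neg hs, ih (i0+1) j h]

theorem findIdx?_or {α : Type} (p q : α → Bool) (l : List α) :
    l.findIdx? (fun a => p a || q a) = pvMinOpt (l.findIdx? p) (l.findIdx? q) := by
  induction l with
  | nil => simp [pvMinOpt]
  | cons a t ih =>
    simp only [List.findIdx?_cons]
    by_cases hp : p a
    · simp [hp]
      cases h : t.findIdx? (fun a => p a || q a) <;> by_cases hq : q a <;>
        simp [hq, pvMinOpt] <;> cases t.findIdx? q <;> simp [pvMinOpt]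
    · by_cases hq : q a
      · simp [hp, hq, pvMinOpt]
        cases t.findIdx? p <;> simp [pvMinOpt]
      · simp only [hp, hq, Bool.or_false, if_false, Bool.false_eq_true, ih]
        cases t.findIdx? p <;> cases t.findIdx? q <;> simp [pvMinOpt] <;> omega

theorem find?_eq_getElem? {α : Type} (p : α → Bool) (l : List α) (j : Nat)
    (hle : j ≤ l.length)
    (hlt : ∀ i (h : i < l.length), i < j → p l[i] = false)
    (hj : ∀ h : j < l.length, p l[j] = true) : l.find? p = l[j]? := by
  induction l generalizing j with
  | nil => simp at hle; simp [hle]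
  | cons a t ih =>
    cases j with
    | zero =>
      have := hj (by simp)
      simp at this
      simp [List.find?_cons, this]
    | succ j =>
      have h0 : p a = false := hlt 0 (by simp) (by omega)
      simp only [List.find?_cons, h0, List.getElem?_cons_succ, Bool.false_eq_true, if_false]
      exact ih j (by simpa using hle)
        (fun i h hi => by simpa using hlt (i+1) (by simpa using h) (by omega))
        (fun h => by simpa using hj (by simpa using h))

theorem pvLf_findIdx? (x : Int) (segs : List PvSeg) (i0 : Nat) :
    ((pvLf segs i0).find? (fun p => decide (x < p.1))).map Prod.snd
      = (segs.findIdx? (pvQL x)).map (· + i0) := by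
  induction segs generalizing i0 with
  | nil => simp [pvLf]
  | cons s rest ih =>
    by_cases hs : s.1 = none
    · rw [pvLf, if_pos hs]
      by_cases hx : x < s.2.1
      · simp [List.find?_cons, List.findIdx?_cons, hx, pvQL, hs]
      · simp only [List.find?_cons, List.findIdx?_cons, pvQL, hs, hx, decide_false,
          Bool.and_false, Bool.false_and, decide_true, Bool.and_true, if_false]
        rw [ih (i0+1)]
        cases rest.findIdx? (pvQL x) <;> simp <;> omega
    · rw [pvLf, if_neg hs]
      have : pvQL x s = false := by simp [pvQL, hs]
      simp only [List.findIdx?_cons, this, Bool.false_eq_true, if_false]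
      rw [ih (i0+1)]
      cases rest.findIdx? (pvQL x) <;> simp <;> omega

theorem pvPlaceA_char (x : Int) (segs : List PvSeg) :
    pvPlaceA x segs = (segs.findIdx? (pvQ x)).map (fun m =>
      if x < ((segs[m]?.getD (none, 0, none)).2.1) then pvSetLeft segs m x else pvSetRight segs m x) := by
  induction segs with
  | nil => simp [pvPlaceA]
  | cons s rest ih =>
    obtain ⟨l, c, r⟩ := s
    rw [pvPlaceA]
    by_cases h1 : x < c ∧ l = none
    · have hq : pvQ x (l, c, r) = true := by simp [pvQ, pvQL, h1.1, h1.2]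
      rw [if_pos h1]
      simp [List.findIdx?_cons, hq, h1.1, pvSetLeft, List.modify_cons]
    · by_cases h2 : x > c ∧ r = none
      · have hq : pvQ x (l, c, r) = true := by simp [pvQ, pvQR, h2.1, h2.2]
        have hnx : ¬ x < c := by omega
        simp [List.findIdx?_cons, hq, hnx, pvSetRight, List.modify_cons, if_neg h1, if_pos h2]
      · have hq : pvQ x (l, c, r) = false := by
          simp only [pvQ, pvQL, pvQR, Bool.or_eq_false_iff, Bool.and_eq_false_iff]
          constructor
          · rcases (not_and_or.1 h1) with h | h
            · left; simpa using h
            · right; simpa using h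
          · rcases (not_and_or.1 h2) with h | h
            · left; simpa using h
            · right; simpa using h
        rw [if_neg h1, if_neg h2, ih]
        simp only [List.findIdx?_cons, hq, Bool.false_eq_true, if_false]
        cases rest.findIdx? (pvQ x) with
        | none => simp
        | some m =>
          simp only [Option.map_some, pvSetLeft, pvSetRight, List.modify_cons,
            Nat.add_sub_cancel, if_neg (Nat.succ_ne_zero m), Nat.succ_ne_zero, if_false,
            List.getElem?_cons_succ]
          split <;> rfl

theorem pvCl_char (x : Int) (segs : List PvSeg) (h : List.Pairwise (· ≤ ·) (pvLc segs)) :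
    (pvLi segs)[PySem.List.bisectRight (pvLc segs) x]? = segs.findIdx? (pvQL x) := by
  obtain ⟨hle, hlt, hge⟩ := PySem.List.bisectRight_spec (pvLc segs) x h
  set j := PySem.List.bisectRight (pvLc segs) x with hj
  have hlen : (pvLc segs).length = (pvLf segs 0).length := by simp [pvLc]
  have hfind : (pvLf segs 0).find? (fun p => decide (x < p.1)) = (pvLf segs 0)[j]? := by
    apply find?_eq_getElem?
    · omega
    · intro i hi hij
      have : (pvLc segs)[i] ≤ x := hlt i (by omega) hij
      simp only [pvLc, List.getElem_map] at this
      simp; omega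
    · intro hjl
      have : x < (pvLc segs)[j] := hge j (by omega) (le_refl _)
      simp only [pvLc, List.getElem_map] at this
      simpa using this
  have := pvLf_findIdx? x segs 0
  rw [hfind] at this
  simp only [pvLi, List.getElem?_map]
  rw [show List.findIdx? (pvQL x) segs = Option.map (· + 0) (List.findIdx? (pvQL x) segs) by
    cases List.findIdx? (pvQL x) segs <;> simp]
  exact this

theorem pvRf_mem (segs : List PvSeg) (i0 : Nat) :
    ∀ p ∈ pvRf segs i0, (∃ s ∈ segs, s.2.2 = none ∧ s.2.1 = p.1) ∧ i0 ≤ p.2 := by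
  induction segs generalizing i0 with
  | nil => simp [pvRf]
  | cons s rest ih =>
    intro p hp
    rw [pvRf] at hp
    by_cases h : s.2.2 = none
    · rw [if_pos h, List.mem_cons] at hp
      rcases hp with hp | hp
      · subst hp; exact ⟨⟨s, by simp, h, rfl⟩, le_refl _⟩
      · obtain ⟨⟨t, ht, h1, h2⟩, h3⟩ := ih (i0+1) p hp
        exact ⟨⟨t, by simp [ht], h1, h2⟩, by omega⟩
    · rw [if_neg h] at hp
      obtain ⟨⟨t, ht, h1, h2⟩, h3⟩ := ih (i0+1) p hp
      exact ⟨⟨t, by simp [ht], h1, h2⟩, by omega⟩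

theorem pvRf_append (x : Int) (segs : List PvSeg) (i0 : Nat) :
    pvRf (segs ++ [(none, x, none)]) i0 = pvRf segs i0 ++ [(x, i0 + segs.length)] := by
  induction segs generalizing i0 with
  | nil => simp [pvRf]
  | cons s rest ih =>
    by_cases h : s.2.2 = none <;>
      simp [pvRf, h, ih (i0+1)] <;> omega

theorem pvRf_modifyLeft (x : Int) (segs : List PvSeg) (i0 n : Nat) :
    pvRf (segs.modify n (fun s => (some x, s.2.1, s.2.2))) i0 = pvRf segs i0 := by
  induction segs generalizing i0 n with
  | nil => simp
  | cons s rest ih =>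
    cases n with
    | zero => simp only [List.modify_cons, if_pos rfl]; simp [pvRf]
    | succ n =>
      simp only [List.modify_cons, Nat.succ_ne_zero, Nat.add_sub_cancel, if_false,
        if_neg (Nat.succ_ne_zero n)]
      simp [pvRf, ih]

theorem pvRf_setRight (x : Int) (segs : List PvSeg) (i0 j : Nat) (c : Int) (m : Nat)
    (h : (pvRf segs i0)[j]? = some (c, m)) :
    pvRf (segs.modify (m - i0) (fun s => (s.1, s.2.1, some x))) i0 = (pvRf segs i0).eraseIdx j := by
  induction segs generalizing i0 j with
  | nil => simp [pvRf] at h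
  | cons s rest ih =>
    by_cases hs : s.2.2 = none
    · rw [pvRf, if_pos hs] at h ⊢
      cases j with
      | zero =>
        simp only [List.getElem?_cons_zero, Option.some.injEq, Prod.mk.injEq] at h
        have hm : m - i0 = 0 := by omega
        rw [hm, List.modify_cons, if_pos rfl]
        rw [pvRf]
        simp
      | succ j =>
        simp only [List.getElem?_cons_succ] at h
        have hge : i0 + 1 ≤ m := (pvRf_mem rest (i0+1) (c, m) (List.mem_of_getElem? h)).2
        have hm : m - i0 = (m - (i0+1)) + 1 := by omega
        rw [hm, List.modify_cons, if_neg (by omega), Nat.add_sub_cancel]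
        rw [pvRf, if_pos hs, ih (i0+1) j h, List.eraseIdx_cons_succ]
    · rw [pvRf, if_neg hs] at h ⊢
      have hge : i0 + 1 ≤ m := (pvRf_mem rest (i0+1) (c, m) (List.mem_of_getElem? h)).2
      have hm : m - i0 = (m - (i0+1)) + 1 := by omega
      rw [hm, List.modify_cons, if_neg (by omega), Nat.add_sub_cancel]
      rw [pvRf, if_neg hs, ih (i0+1) j h]

theorem pvRf_findIdx? (x : Int) (segs : List PvSeg) (i0 : Nat) :
    ((pvRf segs i0).find? (fun p => decide (p.1 < x))).map Prod.snd
      = (segs.findIdx? (pvQR x)).map (· + i0) := by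
  induction segs generalizing i0 with
  | nil => simp [pvRf]
  | cons s rest ih =>
    by_cases hs : s.2.2 = none
    · rw [pvRf, if_pos hs]
      by_cases hx : s.2.1 < x
      · simp [List.find?_cons, List.findIdx?_cons, hx, pvQR, hs]
      · simp only [List.find?_cons, List.findIdx?_cons, pvQR, hs, hx, decide_false,
          Bool.and_false, Bool.false_and, decide_true, Bool.and_true, if_false]
        rw [ih (i0+1)]
        cases rest.findIdx? (pvQR x) <;> simp <;> omega
    · rw [pvRf, if_neg hs]
      have : pvQR x s = false := by simp [pvQR, hs]
      simp only [List.findIdx?_cons, this, Bool.false_eq_true, if_false]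
      rw [ih (i0+1)]
      cases rest.findIdx? (pvQR x) <;> simp <;> omega

theorem pvCr_char (x : Int) (segs : List PvSeg) (h : List.Pairwise (· ≤ ·) (pvRc segs)) :
    (pvRi segs)[PySem.List.bisectRight (pvRc segs) (-x)]? = segs.findIdx? (pvQR x) := by
  obtain ⟨hle, hlt, hge⟩ := PySem.List.bisectRight_spec (pvRc segs) (-x) h
  set j := PySem.List.bisectRight (pvRc segs) (-x) with hj
  have hlen : (pvRc segs).length = (pvRf segs 0).length := by simp [pvRc]
  have hfind : (pvRf segs 0).find? (fun p => decide (p.1 < x)) = (pvRf segs 0)[j]? := by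
    apply find?_eq_getElem?
    · omega
    · intro i hi hij
      have : (pvRc segs)[i] ≤ -x := hlt i (by omega) hij
      simp only [pvRc, List.getElem_map] at this
      simp; omega
    · intro hjl
      have : -x < (pvRc segs)[j] := hge j (by omega) (le_refl _)
      simp only [pvRc, List.getElem_map] at this
      simp; omega
  have := pvRf_findIdx? x segs 0
  rw [hfind] at this
  simp only [pvRi, List.getElem?_map]
  rw [show List.findIdx? (pvQR x) segs = Option.map (· + 0) (List.findIdx? (pvQR x) segs) by
    cases List.findIdx? (pvQR x) segs <;> simp]
  exact this

theorem pvLeft_derived (x : Int) (segs : List PvSeg) (j a : Nat)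
    (h : (pvLi segs)[j]? = some a) :
    pvLc (pvSetLeft segs a x) = (pvLc segs).eraseIdx j ∧
    pvLi (pvSetLeft segs a x) = (pvLi segs).eraseIdx j ∧
    pvRc (pvSetLeft segs a x) = pvRc segs ∧
    pvRi (pvSetLeft segs a x) = pvRi segs := by
  simp only [pvLi, List.getElem?_map, Option.map_eq_some_iff] at h
  obtain ⟨p, hp, hpa⟩ := h
  have hset : pvLf (pvSetLeft segs a x) 0 = (pvLf segs 0).eraseIdx j := by
    have := pvLf_setLeft x segs 0 j p.1 p.2 (by rw [hp])
    simpa [pvSetLeft, hpa] using this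
  refine ⟨?_, ?_, ?_, ?_⟩
  · rw [pvLc, hset, pvLc, List.eraseIdx_map]
  · rw [pvLi, hset, pvLi, List.eraseIdx_map]
  · rw [pvRc, pvSetLeft, pvRf_modifyLeft, pvRc]
  · rw [pvRi, pvSetLeft, pvRf_modifyLeft, pvRi]

theorem pvRight_derived (x : Int) (segs : List PvSeg) (k b : Nat)
    (h : (pvRi segs)[k]? = some b) :
    pvRc (pvSetRight segs b x) = (pvRc segs).eraseIdx k ∧
    pvRi (pvSetRight segs b x) = (pvRi segs).eraseIdx k ∧
    pvLc (pvSetRight segs b x) = pvLc segs ∧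
    pvLi (pvSetRight segs b x) = pvLi segs := by
  simp only [pvRi, List.getElem?_map, Option.map_eq_some_iff] at h
  obtain ⟨p, hp, hpb⟩ := h
  have hset : pvRf (pvSetRight segs b x) 0 = (pvRf segs 0).eraseIdx k := by
    have := pvRf_setRight x segs 0 k p.1 p.2 (by rw [hp])
    simpa [pvSetRight, hpb] using this
  refine ⟨?_, ?_, ?_, ?_⟩
  · rw [pvRc, hset, pvRc, List.eraseIdx_map]
  · rw [pvRi, hset, pvRi, List.eraseIdx_map]
  · rw [pvLc, pvSetRight, pvLf_modifyRight, pvLc]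
  · rw [pvLi, pvSetRight, pvLf_modifyRight, pvLi]

theorem pvAppend_derived (x : Int) (segs : List PvSeg) :
    pvLc (segs ++ [(none, x, none)]) = pvLc segs ++ [x] ∧
    pvLi (segs ++ [(none, x, none)]) = pvLi segs ++ [segs.length] ∧
    pvRc (segs ++ [(none, x, none)]) = pvRc segs ++ [-x] ∧
    pvRi (segs ++ [(none, x, none)]) = pvRi segs ++ [segs.length] := by
  refine ⟨?_, ?_, ?_, ?_⟩ <;>
    simp [pvLc, pvLi, pvRc, pvRi, pvLf_append, pvRf_append]

theorem pvStep_eq (segs : List PvSeg) (x : Int) (hinv : pvInv segs) :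
    pvStepB (segs, pvLc segs, pvLi segs, pvRc segs, pvRi segs) x
      = (pvStepA segs x, pvLc (pvStepA segs x), pvLi (pvStepA segs x),
         pvRc (pvStepA segs x), pvRi (pvStepA segs x)) ∧ pvInv (pvStepA segs x) := by
  obtain ⟨hL, hR⟩ := hinv
  have hcl := pvCl_char x segs hL
  have hcr := pvCr_char x segs hR
  have hor : segs.findIdx? (pvQ x) = pvMinOpt (segs.findIdx? (pvQL x)) (segs.findIdx? (pvQR x)) :=
    findIdx?_or (pvQL x) (pvQR x) segs
  have hplace := pvPlaceA_char x segs
  cases holv : segs.findIdx? (pvQL x) with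
  | none =>
    cases horv : segs.findIdx? (pvQR x) with
    | none =>
      have hnoL : ∀ s ∈ segs, pvQL x s = false := List.findIdx?_eq_none_iff.1 holv
      have hLle : ∀ c ∈ pvLc segs, c ≤ x := by
        intro c hc
        simp only [pvLc, List.mem_map] at hc
        obtain ⟨p, hp, rfl⟩ := hc
        obtain ⟨⟨s, hs, hs1, hs2⟩, -⟩ := pvLf_mem segs 0 p hp
        have := hnoL s hs
        simp [pvQL, hs1, hs2] at this
        omega
      have hnoR : ∀ s ∈ segs, pvQR x s = false := List.findIdx?_eq_none_iff.1 horv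
      have hRle : ∀ c ∈ pvRc segs, c ≤ -x := by
        intro c hc
        simp only [pvRc, List.mem_map] at hc
        obtain ⟨p, hp, rfl⟩ := hc
        obtain ⟨⟨s, hs, hs1, hs2⟩, -⟩ := pvRf_mem segs 0 p hp
        have := hnoR s hs
        simp [pvQR, hs1, hs2] at this
        omega
      have hA : pvStepA segs x = segs ++ [(none, x, none)] := by
        rw [pvStepA, hplace, hor, holv, horv]
        simp [pvMinOpt]
      obtain ⟨d1, d2, d3, d4⟩ := pvAppend_derived x segs
      constructor
      · simp only [pvStepB, hcl, hcr, holv, horv, hA, d1, d2, d3, d4]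
      · rw [hA]
        constructor
        · rw [d1, List.pairwise_append]
          exact ⟨hL, by simp, by simpa using hLle⟩
        · rw [d3, List.pairwise_append]
          exact ⟨hR, by simp, by simpa using hRle⟩
    | some b =>
      obtain ⟨hblt, hqb, -⟩ := List.findIdx?_eq_some_iff_getElem.1 horv
      have hbc : segs[b].2.1 < x := by
        simp only [pvQR, Bool.and_eq_true, decide_eq_true_eq] at hqb
        exact hqb.1
      have hA : pvStepA segs x = pvSetRight segs b x := by
        rw [pvStepA, hplace, hor, holv, horv]
        simp only [pvMinOpt, Option.map_some]
        rw [List.getElem?_eq_getElem hblt]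
        simp only [Option.getD_some, if_neg (by omega : ¬ x < segs[b].2.1)]
      have hri : (pvRi segs)[PySem.List.bisectRight (pvRc segs) (-x)]? = some b := by
        rw [hcr, horv]
      obtain ⟨d1, d2, d3, d4⟩ := pvRight_derived x segs _ b hri
      constructor
      · simp only [pvStepB, hcl, hcr, holv, horv, hA, d1, d2, d3, d4]
      · rw [hA]
        refine ⟨?_, ?_⟩
        · rw [d3]; exact hL
        · rw [d1]; exact List.Pairwise.sublist (List.eraseIdx_sublist _ _) hR
  | some a =>
    obtain ⟨halt, hqa, -⟩ := List.findIdx?_eq_some_iff_getElem.1 holv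
    have hac : x < segs[a].2.1 := by
      simp only [pvQL, Bool.and_eq_true, decide_eq_true_eq] at hqa
      exact hqa.1
    have hli : (pvLi segs)[PySem.List.bisectRight (pvLc segs) x]? = some a := by
      rw [hcl, holv]
    obtain ⟨e1, e2, e3, e4⟩ := pvLeft_derived x segs _ a hli
    have hinvL : pvInv (pvSetLeft segs a x) := by
      refine ⟨?_, ?_⟩
      · rw [e1]; exact List.Pairwise.sublist (List.eraseIdx_sublist _ _) hL
      · rw [e3]; exact hR
    cases horv : segs.findIdx? (pvQR x) with
    | none =>
      have hA : pvStepA segs x = pvSetLeft segs a x := by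
        rw [pvStepA, hplace, hor, holv, horv]
        simp only [pvMinOpt, Option.map_some]
        rw [List.getElem?_eq_getElem halt]
        simp only [Option.getD_some, if_pos hac]
      constructor
      · simp only [pvStepB, hcl, hcr, holv, horv, hA, e1, e2, e3, e4]
      · rw [hA]; exact hinvL
    | some b =>
      obtain ⟨hblt, hqb, -⟩ := List.findIdx?_eq_some_iff_getElem.1 horv
      have hbc : segs[b].2.1 < x := by
        simp only [pvQR, Bool.and_eq_true, decide_eq_true_eq] at hqb
        exact hqb.1
      have hab : a ≠ b := by
        intro h; subst h; omega
      have hri : (pvRi segs)[PySem.List.bisectRight (pvRc segs) (-x)]? = some b := by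
        rw [hcr, horv]
      obtain ⟨d1, d2, d3, d4⟩ := pvRight_derived x segs _ b hri
      have hinvR : pvInv (pvSetRight segs b x) := by
        refine ⟨?_, ?_⟩
        · rw [d3]; exact hL
        · rw [d1]; exact List.Pairwise.sublist (List.eraseIdx_sublist _ _) hR
      by_cases hlt : a < b
      · have hA : pvStepA segs x = pvSetLeft segs a x := by
          rw [pvStepA, hplace, hor, holv, horv]
          simp only [pvMinOpt, Option.map_some, min_eq_left (le_of_lt hlt)]
          rw [List.getElem?_eq_getElem halt]
          simp only [Option.getD_some, if_pos hac]
        constructor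
        · simp only [pvStepB, hcl, hcr, holv, horv, hA, e1, e2, e3, e4, if_pos hlt]
        · rw [hA]; exact hinvL
      · have hba : b < a := by omega
        have hA : pvStepA segs x = pvSetRight segs b x := by
          rw [pvStepA, hplace, hor, holv, horv]
          simp only [pvMinOpt, Option.map_some, min_eq_right (le_of_lt hba)]
          rw [List.getElem?_eq_getElem hblt]
          simp only [Option.getD_some, if_neg (by omega : ¬ x < segs[b].2.1)]
        constructor
        · simp only [pvStepB, hcl, hcr, holv, horv, hA, d1, d2, d3, d4, if_neg hlt]
        · rw [hA]; exact hinvR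

theorem pvFold_eq (nums : List Int) (segs : List PvSeg) (hinv : pvInv segs) :
    nums.foldl pvStepB (segs, pvLc segs, pvLi segs, pvRc segs, pvRi segs)
      = (nums.foldl pvStepA segs, pvLc (nums.foldl pvStepA segs), pvLi (nums.foldl pvStepA segs),
         pvRc (nums.foldl pvStepA segs), pvRi (nums.foldl pvStepA segs)) := by
  induction nums generalizing segs with
  | nil => simp
  | cons x t ih =>
    obtain ⟨hstep, hinv'⟩ := pvStep_eq segs x hinv
    simp only [List.foldl_cons, hstep]
    exact ih (pvStepA segs x) hinv'

-- ===== VERDICT (by name: the statement is the Claim_ definition above) =====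
theorem fishbone_spec : Claim_equal_fishbone := by
  intro numbers _
  unfold Spec_fishbone fishbone fishbone_alt
  have h := pvFold_eq numbers [] (by constructor <;> simp [pvLc, pvRc, pvLf, pvRf])
  simp only [pvLc, pvLi, pvRc, pvRi, pvLf, pvRf, List.map_nil] at h
  rw [h]
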